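-- pv_equiv track=rewrite | github.com/i-dea-by/py_coding_marathon | marathon_01/task09/main.py | re_translator
-- ===== SOURCE A (Python) =====
-- def re_translator(string: str) -> str:
--     """
--     Функция производит обртную кодировку из "двуликого" кода в исходную строку
--
--     :param string: str - входная строка символов
--     :return: str - восстановленная строка, если при раскодировании возникла ошибка, вместо символа вставляется ERR
--     """
--     # проверяем соответствие типов
--     if not isinstance(string, str):
--         raise ValueError('translator() - не правильный тип данных передан в параметрах!')
--
--     lst = string.split(' ')
--     result = []
--     for word in lst:
--         binary_lst = []
--         for char in word:
--             if char == '_':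
--                 continue
--             binary_lst.append('1') if char.isupper() else binary_lst.append('0')
--         binary = ''.join(binary_lst)
--
--         if binary and int(binary, 2) < 0x110000:  # проверяем чтоб не было пустого списка или выхода за пределы для chr()
--             result.append(chr(int(binary, 2)))
--         else:
--             result.append('ERR')
--     return ''.join(result)
-- ===== SOURCE B (Python) =====
-- def re_translator(string: str) -> str:
--     """Single pass over the characters with an integer Horner accumulator and a bit
--     counter, flushing a decoded character at each space: no split, no per-word
--     binary string built and re-parsed."""
--     out = []
--     num = 0
--     bits = 0
--     for ch in string + ' ':
--         if ch == ' ':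
--             out.append('ERR' if bits == 0 or num >= 0x110000 else chr(num))
--             num = 0
--             bits = 0
--         elif ch != '_':
--             num = num * 2 + (1 if ch.isupper() else 0)
--             bits += 1
--     return ''.join(out)
-- ===== Notes on version B (the rewrite author's own statement) =====
-- stated objective: simpler
-- what changed: B replaces A's split-into-words plus per-word binary digit string building and int(binary, 2) re-parsing by a single pass over the characters that keeps an integer Horner accumulator and a bit counter and flushes a decoded character or the error marker at each space.
import Mathlib
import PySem

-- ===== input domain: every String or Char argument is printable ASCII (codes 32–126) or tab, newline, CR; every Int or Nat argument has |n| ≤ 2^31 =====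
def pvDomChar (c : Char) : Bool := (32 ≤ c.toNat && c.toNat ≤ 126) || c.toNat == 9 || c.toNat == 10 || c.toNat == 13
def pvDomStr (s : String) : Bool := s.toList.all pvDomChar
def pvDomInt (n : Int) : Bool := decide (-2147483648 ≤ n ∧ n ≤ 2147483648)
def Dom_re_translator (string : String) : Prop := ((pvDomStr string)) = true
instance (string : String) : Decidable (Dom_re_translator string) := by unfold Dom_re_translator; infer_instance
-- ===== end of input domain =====

-- B decodes in a single pass with an integer Horner accumulator and a bit counter, flushing at each
-- space, instead of A's split-into-words plus per-word binary digit string building re-parsed by int(binary, 2):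
-- a simpler decomposition, same O(n) cost.


-- ===== PORT A =====
-- A's inner loop: build the list of binary digit chars (uppercase = 1) of a word, skipping underscores
def reA_bits (word : List Char) : List Char :=
  word.foldl (fun binary_lst c =>
    if c = '_' then binary_lst
    else binary_lst ++ [if PySem.Chars.isupper c then '1' else '0']) []

-- int(binary, 2): `binary` is by construction a list of binary digit chars only (and nonempty where
-- A calls int on it), on which int with base 2 is the plain base-2 digit value; ported as the direct
-- base-2 digit fold, exact on that input shape.
def reA_int2 (binary : List Char) : Int :=
  binary.foldl (fun a c => 2 * a + (if c = '1' then 1 else 0)) 0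

def re_translator (string : String) : String :=
  let lst := PySem.Chars.splitOn string.toList [' ']
  let result := lst.foldl (fun result word =>
    let binary := reA_bits word
    if binary ≠ [] ∧ reA_int2 binary < 0x110000 then
      -- chr(n): Char.ofNat is exact for non-surrogate code points < 0x110000 (Pre_ excludes surrogates)
      result ++ [[Char.ofNat (reA_int2 binary).toNat]]
    else
      result ++ [['E', 'R', 'R']]) []
  String.mk (PySem.Chars.join [] result)

-- ===== PORT B =====
-- one step of B's single pass: state = (output chars, Horner accumulator num, bit counter bits)
def reB_step (st : List Char × Int × Int) (ch : Char) : List Char × Int × Int :=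
  if ch = ' ' then
    (st.1 ++ (if st.2.2 = 0 ∨ 0x110000 ≤ st.2.1 then ['E', 'R', 'R']
              else [Char.ofNat st.2.1.toNat]), 0, 0)   -- chr(num): exact here, as in port A
  else if ch = '_' then st
  else (st.1, st.2.1 * 2 + (if PySem.Chars.isupper ch then 1 else 0), st.2.2 + 1)

def re_translator_alt (string : String) : String :=
  String.mk (((string.toList ++ [' ']).foldl reB_step ([], 0, 0)).1)

-- ===== PRECONDITION & SPEC =====
-- helper for Pre_ only: the case-bit value of one word (underscores skipped)
def pvCaseVal (w : List Char) : Int :=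
  (w.foldl (fun (p : Int × Int) c =>
    if c = '_' then p
    else (2 * p.1 + (if PySem.Chars.isupper c then 1 else 0), p.2 + 1)) (0, 0)).1

-- Pre_ excludes strings in which some space-separated word's case-bit pattern decodes to a UTF-16
-- surrogate code point (0xD800–0xDFFF): there Python A returns a str containing a lone surrogate,
-- which is not a value of Lean's String/Char type (no other inputs are excluded).
def Pre_re_translator (string : String) : Prop :=
  ∀ w ∈ PySem.Chars.splitOn string.toList [' '],
    ¬ (0xD800 ≤ pvCaseVal w ∧ pvCaseVal w < 0xE000)
instance (string : String) : Decidable (Pre_re_translator string) := by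
  unfold Pre_re_translator; infer_instance

def pvWitness_re_translator : String := "Hello World_x"

def Spec_re_translator (string : String) (out : String) : Prop := out = re_translator_alt string
instance (string : String) (out : String) : Decidable (Spec_re_translator string out) := by
  unfold Spec_re_translator; infer_instance

-- ===== CLAIM (what is proved, stated in full; the proofs are below) =====
def Claim_equal_re_translator : Prop := ∀ (string : String), Dom_re_translator string → Pre_re_translator string → Spec_re_translator string (re_translator string)

-- ===== LEMMAS AND PROOFS =====

-- structural single-space splitter (proof-only; shown equal to PySem.Chars.splitOn · [' '])
def splitSp : List Char → List (List Char)
  | [] => [[]]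
  | c :: rest =>
    if c = ' ' then [] :: splitSp rest
    else
      match splitSp rest with
      | [] => [[c]]
      | w :: ws => (c :: w) :: ws

lemma splitSp_ne_nil (l : List Char) : splitSp l ≠ [] := by
  induction l with
  | nil => simp [splitSp]
  | cons c rest ih =>
    simp only [splitSp]
    split
    · simp
    · cases h : splitSp rest <;> simp

-- prepend chars to the first piece (what splitOn.go's `cur` accumulator holds)
def pvConsHead (p : List Char) : List (List Char) → List (List Char)
  | [] => [p]
  | w :: ws => (p ++ w) :: ws

lemma go_eq : ∀ (fuel : Nat) (l cur : List Char) (acc : List (List Char)), l.length < fuel →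
    PySem.Chars.splitOn.go [' '] fuel l cur acc
      = acc.reverse ++ pvConsHead cur.reverse (splitSp l) := by
  intro fuel
  induction fuel with
  | zero => intro l cur acc h; omega
  | succ n ih =>
    intro l cur acc h
    cases l with
    | nil => simp [PySem.Chars.splitOn.go, splitSp, pvConsHead]
    | cons c rest =>
      simp only [PySem.Chars.splitOn.go]
      by_cases hc : c = ' '
      · subst hc
        rw [if_pos (by simp [List.isPrefixOf])]
        rw [ih _ _ _ (by simpa using Nat.lt_of_succ_lt_succ h)]
        simp [splitSp]
        cases hs : splitSp rest with
        | nil => exact absurd hs (splitSp_ne_nil rest)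
        | cons w ws => simp [pvConsHead]
      · rw [if_neg (by simp [List.isPrefixOf]; exact fun h => hc h.symm)]
        rw [ih _ _ _ (by simpa using Nat.lt_of_succ_lt_succ h)]
        simp only [splitSp, hc]
        cases hs : splitSp rest with
        | nil => exact absurd hs (splitSp_ne_nil rest)
        | cons w ws => simp [pvConsHead]

lemma splitOn_eq_splitSp (l : List Char) :
    PySem.Chars.splitOn l [' '] = splitSp l := by
  have := go_eq (l.length + 1) l [] [] (by omega)
  cases hs : splitSp l with
  | nil => exact absurd hs (splitSp_ne_nil l)
  | cons w ws => simpa [PySem.Chars.splitOn, pvConsHead, hs] using this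

-- the piece emitted for a finished word whose accumulator is (num, bits)
def pvEmit (num bits : Int) : List Char :=
  if bits = 0 ∨ 0x110000 ≤ num then ['E', 'R', 'R'] else [Char.ofNat num.toNat]

-- extend an accumulator through a word's characters
def pvExt (p : Int × Int) (w : List Char) : Int × Int :=
  w.foldl (fun p c =>
    if c = '_' then p
    else (p.1 * 2 + (if PySem.Chars.isupper c then 1 else 0), p.2 + 1)) p

def pvDecode : List (List Char) → List Char
  | [] => []
  | w :: ws => pvEmit (pvExt (0, 0) w).1 (pvExt (0, 0) w).2 ++ pvDecode ws

-- B's remaining output from state (num, bits) on the rest of the input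
def pvSpecB (num bits : Int) : List Char → List Char
  | [] => pvEmit num bits
  | c :: rest =>
    if c = ' ' then pvEmit num bits ++ pvSpecB 0 0 rest
    else if c = '_' then pvSpecB num bits rest
    else pvSpecB (num * 2 + (if PySem.Chars.isupper c then 1 else 0)) (bits + 1) rest

lemma foldB_eq : ∀ (l : List Char) (out : List Char) (num bits : Int),
    ((l ++ [' ']).foldl reB_step (out, num, bits)).1 = out ++ pvSpecB num bits l := by
  intro l
  induction l with
  | nil => intro out num bits; simp [reB_step, pvSpecB, pvEmit]
  | cons c rest ih =>
    intro out num bits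
    rw [List.cons_append, List.foldl_cons]
    by_cases hc : c = ' '
    · subst hc
      rw [show reB_step (out, num, bits) ' ' = (out ++ pvEmit num bits, 0, 0) from by
        simp [reB_step, pvEmit]]
      rw [ih]
      simp [pvSpecB]
    · by_cases hu : c = '_'
      · subst hu
        rw [show reB_step (out, num, bits) '_' = (out, num, bits) from by simp [reB_step]]
        rw [ih]
        simp [pvSpecB]
      · rw [show reB_step (out, num, bits) c
              = (out, num * 2 + (if PySem.Chars.isupper c then 1 else 0), bits + 1) from by
            simp [reB_step, hc, hu]]
        rw [ih]
        simp [pvSpecB, hc, hu]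

lemma specB_eq : ∀ (l : List Char) (num bits : Int),
    pvSpecB num bits l
      = (match splitSp l with
         | [] => []
         | w :: ws => pvEmit (pvExt (num, bits) w).1 (pvExt (num, bits) w).2 ++ pvDecode ws) := by
  intro l
  induction l with
  | nil => intro num bits; simp [splitSp, pvSpecB, pvExt, pvDecode]
  | cons c rest ih =>
    intro num bits
    by_cases hc : c = ' '
    · subst hc
      simp only [pvSpecB, if_pos rfl, splitSp, ih]
      cases hs : splitSp rest with
      | nil => exact absurd hs (splitSp_ne_nil rest)
      | cons w ws => simp [pvExt, pvDecode]
    · by_cases hu : c = '_'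
      · subst hu
        simp only [pvSpecB, splitSp, ih]
        cases hs : splitSp rest with
        | nil => exact absurd hs (splitSp_ne_nil rest)
        | cons w ws => simp [pvExt]
      · simp only [pvSpecB, if_neg hc, splitSp, ih]
        cases hs : splitSp rest with
        | nil => exact absurd hs (splitSp_ne_nil rest)
        | cons w ws => simp [pvExt, hu]

lemma reA_int2_snoc (acc : List Char) (d : Char) :
    reA_int2 (acc ++ [d]) = 2 * reA_int2 acc + (if d = '1' then 1 else 0) := by
  simp [reA_int2]

lemma ext_fold : ∀ (w acc : List Char),
    pvExt (reA_int2 acc, (acc.length : Int)) w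
      = (reA_int2 (w.foldl (fun binary_lst c =>
            if c = '_' then binary_lst
            else binary_lst ++ [if PySem.Chars.isupper c then '1' else '0']) acc),
         ((w.foldl (fun binary_lst c =>
            if c = '_' then binary_lst
            else binary_lst ++ [if PySem.Chars.isupper c then '1' else '0']) acc).length : Int)) := by
  intro w
  induction w with
  | nil => intro acc; simp [pvExt]
  | cons c rest ih =>
    intro acc
    by_cases hu : c = '_'
    · subst hu
      simp only [pvExt, List.foldl_cons, if_pos rfl]
      exact ih acc
    · simp only [pvExt, List.foldl_cons, if_neg hu]
      have h2 : reA_int2 acc * 2 + (if PySem.Chars.isupper c then (1:Int) else 0)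
          = reA_int2 (acc ++ [if PySem.Chars.isupper c then '1' else '0']) := by
        rw [reA_int2_snoc]
        by_cases hup : PySem.Chars.isupper c <;> simp [hup] <;> ring
      have h3 : ((acc.length : Int) + 1)
          = (((acc ++ [if PySem.Chars.isupper c then '1' else '0']).length : Int)) := by
        simp
      rw [h2, h3]
      exact ih _

lemma A_word_eq (w : List Char) :
    (if reA_bits w ≠ [] ∧ reA_int2 (reA_bits w) < 0x110000 then
      [Char.ofNat (reA_int2 (reA_bits w)).toNat]
     else ['E', 'R', 'R'])
      = pvEmit (pvExt (0, 0) w).1 (pvExt (0, 0) w).2 := by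
  rw [show ((0 : Int), (0 : Int)) = (reA_int2 [], ((List.length ([] : List Char)) : Int)) from by
    simp [reA_int2]]
  rw [ext_fold w []]
  simp only [pvEmit, reA_bits]
  by_cases hnil : (w.foldl (fun binary_lst c =>
            if c = '_' then binary_lst
            else binary_lst ++ [if PySem.Chars.isupper c then '1' else '0']) []) = []
  · simp [hnil, reA_int2]
  · have hlen : ((w.foldl (fun binary_lst c =>
            if c = '_' then binary_lst
            else binary_lst ++ [if PySem.Chars.isupper c then '1' else '0']) []).length : Int) ≠ 0 := by
      simpa using hnil
    by_cases hlt : reA_int2 (w.foldl (fun binary_lst c =>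
            if c = '_' then binary_lst
            else binary_lst ++ [if PySem.Chars.isupper c then '1' else '0']) []) < 0x110000
    · simp [hnil, hlt, hlen, not_le.mpr hlt]
    · simp [hnil, hlt, hlen, not_lt.mp hlt]

lemma join_nil_eq_flatten : ∀ (ps : List (List Char)), PySem.Chars.join [] ps = ps.flatten := by
  intro ps
  induction ps with
  | nil => simp [PySem.Chars.join_nil]
  | cons p rest ih =>
    cases rest with
    | nil => simp [PySem.Chars.join_singleton]
    | cons q rest' => rw [PySem.Chars.join_cons_cons]; simp [ih]

lemma foldA_flatten : ∀ (ws : List (List Char)) (acc : List (List Char)),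
    (ws.foldl (fun result word =>
      let binary := reA_bits word
      if binary ≠ [] ∧ reA_int2 binary < 0x110000 then
        result ++ [[Char.ofNat (reA_int2 binary).toNat]]
      else
        result ++ [['E', 'R', 'R']]) acc).flatten
      = acc.flatten ++ pvDecode ws := by
  intro ws
  induction ws with
  | nil => intro acc; simp [pvDecode]
  | cons w rest ih =>
    intro acc
    rw [List.foldl_cons]
    show (List.foldl _ (if reA_bits w ≠ [] ∧ reA_int2 (reA_bits w) < 0x110000 then
        acc ++ [[Char.ofNat (reA_int2 (reA_bits w)).toNat]]
      else acc ++ [['E', 'R', 'R']]) rest).flatten = acc.flatten ++ pvDecode (w :: rest)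
    have hsplit : (if reA_bits w ≠ [] ∧ reA_int2 (reA_bits w) < 0x110000 then
        acc ++ [[Char.ofNat (reA_int2 (reA_bits w)).toNat]]
      else acc ++ [['E', 'R', 'R']])
        = acc ++ [(if reA_bits w ≠ [] ∧ reA_int2 (reA_bits w) < 0x110000 then
            [Char.ofNat (reA_int2 (reA_bits w)).toNat] else ['E', 'R', 'R'])] := by
      split <;> rfl
    rw [hsplit, ih, A_word_eq w]
    simp [pvDecode]

lemma main_eq (s : String) : re_translator s = re_translator_alt s := by
  show String.mk (PySem.Chars.join [] (List.foldl _ [] (PySem.Chars.splitOn s.toList [' ']))) = _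
  unfold re_translator_alt
  rw [foldB_eq, specB_eq, splitOn_eq_splitSp, join_nil_eq_flatten, foldA_flatten]
  cases hs : splitSp s.toList with
  | nil => exact absurd hs (splitSp_ne_nil _)
  | cons w ws => simp [pvDecode]

-- ===== VERDICT (by name: the statement is the Claim_ definition above) =====
theorem re_translator_spec : Claim_equal_re_translator := by
  intro s _ _
  unfold Spec_re_translator
  exact main_eq s
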